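-- pv_equiv track=rewrite | github.com/arishboteco/BotecoMasterDashboard | sheet_reports.py | _to_super_category
-- ===== SOURCE A (Python) =====
-- def _to_super_category(name: str) -> str:
--     k = str(name or "").strip().lower()
--     if not k:
--         return "Other"
--     if "beer" in k:
--         return "Beer"
--     if any(
--         x in k
--         for x in (
--             "liquor",
--             "spirit",
--             "wine",
--             "cocktail",
--             "whisky",
--             "vodka",
--             "gin",
--             "rum",
--         )
--     ):
--         return "Liquor"
--     if any(x in k for x in ("tobacco", "hookah", "cigar")):
--         return "Tobacco"
--     if any(
--         x in k
--         for x in ("coffee", "hot beverage", "hot beverages", "espresso", "cappuccino")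
--     ):
--         return "Coffee"
--     if any(
--         x in k
--         for x in (
--             "soft",
--             "beverage",
--             "drink",
--             "juice",
--             "mocktail",
--             "water",
--             "tea",
--             "soda",
--         )
--     ):
--         return "Soft Beverages"
--     return "Food"
-- ===== SOURCE B (Python) =====
-- # B: instead of a cascade of per-category checks with early return, scan ONE flat
-- # keyword->priority table, accumulate the MINIMUM priority of any matching keyword,
-- # and index into a category array (no early return, no per-category branching).
-- _CATS = ["Beer", "Liquor", "Tobacco", "Coffee", "Soft Beverages", "Food"]
--
-- _KW = [
--     ("beer", 0),
--     ("liquor", 1), ("spirit", 1), ("wine", 1), ("cocktail", 1),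
--     ("whisky", 1), ("vodka", 1), ("gin", 1), ("rum", 1),
--     ("tobacco", 2), ("hookah", 2), ("cigar", 2),
--     ("coffee", 3), ("hot beverage", 3), ("hot beverages", 3),
--     ("espresso", 3), ("cappuccino", 3),
--     ("soft", 4), ("beverage", 4), ("drink", 4), ("juice", 4),
--     ("mocktail", 4), ("water", 4), ("tea", 4), ("soda", 4),
-- ]
--
--
-- def _to_super_category(name: str) -> str:
--     k = str(name or "").strip().lower()
--     if not k:
--         return "Other"
--     best = len(_CATS) - 1
--     for kw, pri in _KW:
--         if pri < best and kw in k: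
--             best = pri
--     return _CATS[best]
-- ===== Notes on version B (the rewrite author's own statement) =====
-- stated objective: alternative
-- what changed: Replaces the early-return if-cascade over per-category keyword tuples with a single min-fold over one flat keyword->priority table, then indexes the resulting minimum priority into a category array.
import Mathlib
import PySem

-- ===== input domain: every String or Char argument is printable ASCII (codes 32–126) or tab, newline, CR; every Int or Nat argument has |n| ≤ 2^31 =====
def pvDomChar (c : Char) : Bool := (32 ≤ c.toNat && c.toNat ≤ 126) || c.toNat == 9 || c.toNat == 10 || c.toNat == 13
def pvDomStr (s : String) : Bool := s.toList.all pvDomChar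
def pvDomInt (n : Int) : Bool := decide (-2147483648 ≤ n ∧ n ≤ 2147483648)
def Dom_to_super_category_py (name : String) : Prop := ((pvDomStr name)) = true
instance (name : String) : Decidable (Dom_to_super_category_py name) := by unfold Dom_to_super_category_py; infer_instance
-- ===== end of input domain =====

-- B replaces A's early-return if-cascade with a min-fold over one flat keyword->priority
-- table, indexing the minimal matching priority into a category array (objective: alternative).

-- ===== PORT A =====
def to_super_category_py (name : String) : String :=
  let k := PySem.Str.lower (PySem.Str.strip name)
  if k = "" then "Other"
  else if PySem.Str.isIn "beer" k then "Beer"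
  else if ["liquor", "spirit", "wine", "cocktail", "whisky", "vodka", "gin", "rum"].any
      (fun x => PySem.Str.isIn x k) then "Liquor"
  else if ["tobacco", "hookah", "cigar"].any (fun x => PySem.Str.isIn x k) then "Tobacco"
  else if ["coffee", "hot beverage", "hot beverages", "espresso", "cappuccino"].any
      (fun x => PySem.Str.isIn x k) then "Coffee"
  else if ["soft", "beverage", "drink", "juice", "mocktail", "water", "tea", "soda"].any
      (fun x => PySem.Str.isIn x k) then "Soft Beverages"
  else "Food"

-- ===== PORT B =====
def superCats : List String := ["Beer", "Liquor", "Tobacco", "Coffee", "Soft Beverages", "Food"]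

def superKw : List (String × Nat) :=
  [("beer", 0),
   ("liquor", 1), ("spirit", 1), ("wine", 1), ("cocktail", 1),
   ("whisky", 1), ("vodka", 1), ("gin", 1), ("rum", 1),
   ("tobacco", 2), ("hookah", 2), ("cigar", 2),
   ("coffee", 3), ("hot beverage", 3), ("hot beverages", 3),
   ("espresso", 3), ("cappuccino", 3),
   ("soft", 4), ("beverage", 4), ("drink", 4), ("juice", 4),
   ("mocktail", 4), ("water", 4), ("tea", 4), ("soda", 4)]

def to_super_category_py_alt (name : String) : String :=
  let k := PySem.Str.lower (PySem.Str.strip name)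
  if k = "" then "Other"
  else
    let best := superKw.foldl
      (fun best p => if p.2 < best && PySem.Str.isIn p.1 k then p.2 else best)
      (superCats.length - 1)
    superCats.getD best ""

-- ===== PRECONDITION & SPEC =====
def Spec_to_super_category_py (name : String) (out : String) : Prop := out = to_super_category_py_alt name
instance (name : String) (out : String) : Decidable (Spec_to_super_category_py name out) := by unfold Spec_to_super_category_py; infer_instance

-- ===== CLAIM (what is proved, stated in full; the proofs are below) =====
def Claim_equal_to_super_category_py : Prop := ∀ (name : String), Dom_to_super_category_py name → Spec_to_super_category_py name (to_super_category_py name)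

-- ===== LEMMAS AND PROOFS =====

-- the fold step used by B's port
def kwStep (k : String) (best : Nat) (p : String × Nat) : Nat :=
  if p.2 < best && PySem.Str.isIn p.1 k then p.2 else best

-- folding a constant-priority segment = one any-test
theorem kwStep_seg (k : String) (i : Nat) (kws : List String) :
    ∀ acc : Nat, (kws.map (fun w => (w, i))).foldl (kwStep k) acc
      = if kws.any (fun w => PySem.Str.isIn w k) && decide (i < acc) then i else acc := by
  induction kws with
  | nil => intro acc; simp
  | cons w ws ih =>
    intro acc
    simp only [List.map_cons, List.foldl_cons, List.any_cons, kwStep, ih]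
    by_cases hw : PySem.Str.isIn w k <;> by_cases hlt : i < acc <;>
      by_cases hany : ws.any (fun w => PySem.Str.isIn w k) <;>
      simp only [hw, hlt, hany, Bool.true_or, Bool.false_or, Bool.true_and, Bool.false_and,
        Bool.and_true, Bool.and_false, decide_eq_true_eq, if_true,
        decide_true, decide_false] <;> split_ifs <;> omega

-- superKw as five constant-priority segments
theorem superKw_segs : superKw =
    (["beer"].map (fun w => (w, 0)))
    ++ (["liquor", "spirit", "wine", "cocktail", "whisky", "vodka", "gin", "rum"].map (fun w => (w, 1)))
    ++ (["tobacco", "hookah", "cigar"].map (fun w => (w, 2)))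
    ++ (["coffee", "hot beverage", "hot beverages", "espresso", "cappuccino"].map (fun w => (w, 3)))
    ++ (["soft", "beverage", "drink", "juice", "mocktail", "water", "tea", "soda"].map (fun w => (w, 4))) := rfl

-- ===== VERDICT (by name: the statement is the Claim_ definition above) =====
theorem to_super_category_py_spec : Claim_equal_to_super_category_py := by
  intro name _
  unfold Spec_to_super_category_py to_super_category_py to_super_category_py_alt
  set k := PySem.Str.lower (PySem.Str.strip name) with hk
  by_cases hke : k = ""
  · simp [hke]
  · simp only [hke, if_false]
    have hfold : superKw.foldl
        (fun best p => if p.2 < best && PySem.Str.isIn p.1 k then p.2 else best)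
        (superCats.length - 1) = superKw.foldl (kwStep k) 5 := rfl
    rw [hfold, superKw_segs]
    simp only [List.foldl_append, kwStep_seg]
    by_cases h0 : ["beer"].any (fun w => PySem.Str.isIn w k) <;>
    by_cases h1 : ["liquor", "spirit", "wine", "cocktail", "whisky", "vodka", "gin", "rum"].any
        (fun w => PySem.Str.isIn w k) <;>
    by_cases h2 : ["tobacco", "hookah", "cigar"].any (fun w => PySem.Str.isIn w k) <;>
    by_cases h3 : ["coffee", "hot beverage", "hot beverages", "espresso", "cappuccino"].any
        (fun w => PySem.Str.isIn w k) <;>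
    by_cases h4 : ["soft", "beverage", "drink", "juice", "mocktail", "water", "tea", "soda"].any
        (fun w => PySem.Str.isIn w k) <;>
    · simp_all [superCats]
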